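-- pv_equiv track=rewrite | github.com/stubborn412/crawl | parsePage.py | splitHtml
-- ===== SOURCE A (Python) =====
-- def splitHtml(html):
-- 	#将html段落切分，标记tag
-- 	#pieces = re.split("[<>]", html)
-- 	#pieces = re.findall("(<.*?>)(.*?)(<.*?>)", html)
-- 	pieces = []
-- 	pos = 0
-- 	i=0
-- 	while True:
-- 		if i > len(html):
-- 			break
-- 		if i < len(html):
-- 			c = html[i]
-- 		else:
-- 			c = "None"
-- 		#检查是否命中分界线
-- 		hitSep = False
-- 		if c in ["<", "None"]:
-- 			hitSep = True
-- 			npos = i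
-- 			#命中分界线
-- 		if c in [">"]:
-- 			hitSep = True
-- 			npos = i+1
-- 		#处理后事
-- 		if hitSep and c!="None" and html[pos]=="<":
-- 			#先不急于分段，检查分界线是否在""包裹中
-- 			status = 0	#0:不在"中  1:"中  2:'中
-- 			for j in range(pos+1, i+1):
-- 				if html[j] == "\"":
-- 					if html[j-1] != "\\":
-- 						if status==0:	status=1
-- 						elif status==1:	status=0
-- 					else:
-- 						#解决url中以\结尾的sb问题
-- 						lastQpos = html.rfind("\"", 0, j-1)
-- 						tmp = html[:lastQpos].replace(" ","").replace("\t","")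
-- 						if tmp.endswith("href="):
-- 							#是个\结尾的url
-- 							status = 0
-- 				if html[j] == "'" and html[j-1] != "\\":
-- 					if status==0:	status=2
-- 					elif status==2:	status=0
-- 			if status != 0:
-- 				hitSep = False
-- 		if hitSep:
-- 			p = html[pos:npos]
-- 			pos = npos
-- 			if len(p) > 0:
-- 				pieces.append(p)
-- 		i+=1
-- #	print "\n".join(pieces)
-- 	return pieces
-- ===== SOURCE B (Python) =====
-- # B: single left-to-right pass; the in-quote status of the current tag segment is
-- # maintained incrementally per character instead of rescanning the segment at every
-- # candidate separator.
--
-- def _step(html, status, j):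
--     # quote-status transition for character html[j] (j >= 1)
--     c = html[j]
--     escaped = html[j - 1] == "\\"
--     if c == '"':
--         if not escaped:
--             status = {0: 1, 1: 0}.get(status, status)
--         else:
--             q = html.rfind('"', 0, j - 1)
--             prefix = html[:q].replace(" ", "").replace("\t", "")
--             if prefix.endswith("href="):
--                 status = 0
--     if c == "'" and not escaped:
--         status = {0: 2, 2: 0}.get(status, status)
--     return status
--
--
-- def splitHtml(html):
--     n = len(html)
--     pieces = []
--     pos = 0
--     in_tag = n > 0 and html[0] == "<"
--     status = 0
--     for i in range(n):
--         c = html[i]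
--         if in_tag and i > pos:
--             status = _step(html, status, i)
--         if c == "<":
--             if not in_tag or status == 0:
--                 if i > pos:
--                     pieces.append(html[pos:i])
--                 pos = i
--                 in_tag = True
--                 status = 0
--         elif c == ">":
--             if not in_tag or status == 0:
--                 pieces.append(html[pos:i + 1])
--                 pos = i + 1
--                 in_tag = pos < n and html[pos] == "<"
--                 status = 0
--     if pos < n:
--         pieces.append(html[pos:])
--     return pieces
-- ===== Notes on version B (the rewrite author's own statement) =====
-- stated objective: alternative
-- what changed: B replaces A's rescanning of the whole current tag segment (inner for-loop over range(pos+1,i+1)) at every candidate separator with a single left-to-right pass that updates the segment's quote status incrementally per character, resetting it whenever a new segment starts.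
import Mathlib
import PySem

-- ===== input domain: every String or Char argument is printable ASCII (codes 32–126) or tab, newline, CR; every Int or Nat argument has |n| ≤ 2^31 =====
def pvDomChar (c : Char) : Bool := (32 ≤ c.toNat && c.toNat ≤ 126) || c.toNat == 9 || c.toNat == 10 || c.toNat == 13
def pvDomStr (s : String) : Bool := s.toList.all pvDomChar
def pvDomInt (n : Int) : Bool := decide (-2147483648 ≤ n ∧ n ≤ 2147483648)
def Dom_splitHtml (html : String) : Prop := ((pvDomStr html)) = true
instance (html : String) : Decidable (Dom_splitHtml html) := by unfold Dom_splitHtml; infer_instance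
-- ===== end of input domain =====

-- B re-implements A's tokenizer as a single left-to-right pass that maintains the tag's
-- quote status incrementally instead of rescanning the segment at every candidate separator.

-- ===== PORT A =====
-- body of A's inner `for j in range(pos+1, i+1)` loop; only invoked with j ≥ 1, so the
-- Nat subtraction j-1 is exactly Python's html[j-1]
def pvStepA (cs : List Char) (st : Nat) (j : Nat) : Nat :=
  let st1 :=
    if cs[j]? = some '"' then
      if ¬ (cs[j-1]? = some '\\') then
        (if st = 0 then 1 else if st = 1 then 0 else st)
      else
        -- lastQpos = html.rfind('"', 0, j-1); tmp = html[:lastQpos].replace(" ","").replace("\t","")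
        let lastQpos := PySem.Chars.rfindFrom cs ['"'] 0 (some ((j : Int) - 1))
        let tmp := PySem.Chars.replace
          (PySem.Chars.replace (PySem.Chars.slice cs none (some lastQpos)) [' '] []) ['\t'] []
        if PySem.Chars.endswith tmp ['h','r','e','f','='] = true then 0 else st
    else st
  if cs[j]? = some '\'' ∧ ¬ (cs[j-1]? = some '\\') then
    (if st1 = 0 then 2 else if st1 = 2 then 0 else st1)
  else st1

-- A's `while True` loop; `c = none` plays Python's "None" sentinel at i = len(html).
-- npos defaults to pos when no separator was hit (Python leaves it unset and unused there).
-- fuel only makes the recursion structural; called with fuel = len+1 it is exactly A's loop,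
-- which breaks (returning pieces) once i exceeds len.
def pvLoopA (cs : List Char) : Nat → Nat → Nat → List (List Char) → List (List Char)
  | 0, _, _, pieces => pieces
  | fuel + 1, i, pos, pieces =>
  if i > cs.length then pieces
  else
    let c := cs[i]?
    let s1 : Bool × Nat := if c = some '<' ∨ c = none then (true, i) else (false, pos)
    let s2 : Bool × Nat := if c = some '>' then (true, i + 1) else s1
    let hitSep : Bool :=
      if s2.1 = true ∧ ¬ c = none ∧ cs[pos]? = some '<' then
        -- range(pos+1, i+1) = List.range' (pos+1) (i - pos): exact (both empty when i ≤ pos)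
        let status := (List.range' (pos + 1) (i - pos)).foldl (pvStepA cs) 0
        if ¬ status = 0 then false else s2.1
      else s2.1
    let next : Nat × List (List Char) :=
      if hitSep = true then
        let p := PySem.List.slice cs (some (pos : Int)) (some (s2.2 : Int))
        (s2.2, if p.length > 0 then pieces ++ [p] else pieces)
      else (pos, pieces)
    pvLoopA cs fuel (i + 1) next.1 next.2

def splitHtml (html : String) : List String :=
  (pvLoopA html.toList (html.toList.length + 1) 0 0 []).map String.ofList

-- ===== PORT B =====
-- Source B's _step: quote-status transition for character html[j], j ≥ 1
def pvStepB (cs : List Char) (st : Nat) (j : Nat) : Nat :=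
  let c := cs[j]?
  let escaped := cs[j-1]? = some '\\'
  let st1 :=
    if c = some '"' then
      if ¬ escaped then (if st = 0 then 1 else if st = 1 then 0 else st)  -- {0:1,1:0}.get(st,st)
      else
        let q := PySem.Chars.rfindFrom cs ['"'] 0 (some ((j : Int) - 1))
        let pre := PySem.Chars.replace
          (PySem.Chars.replace (PySem.Chars.slice cs none (some q)) [' '] []) ['\t'] []
        if PySem.Chars.endswith pre ['h','r','e','f','='] = true then 0 else st
    else st
  if c = some '\'' ∧ ¬ escaped then (if st1 = 0 then 2 else if st1 = 2 then 0 else st1) else st1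

-- Source B's single `for i in range(n)` pass plus the final append; fuel only makes the
-- recursion structural: called with fuel = len - i it is exactly Source B's for-loop
def pvLoopB (cs : List Char) : Nat → Nat → Nat → Bool → Nat → List (List Char) → List (List Char)
  | 0, _, pos, _, _, acc => if pos < cs.length then acc ++ [cs.drop pos] else acc
  | fuel + 1, i, pos, inTag, st, acc =>
  if i < cs.length then
    let c := cs.getD i ' '   -- i < len here, so this is exactly html[i]
    let st' := if inTag = true ∧ pos < i then pvStepB cs st i else st
    if c = '<' then
      if inTag = false ∨ st' = 0 then
        pvLoopB cs fuel (i + 1) i true 0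
          (if pos < i then acc ++ [(cs.drop pos).take (i - pos)] else acc)
      else pvLoopB cs fuel (i + 1) pos inTag st' acc
    else if c = '>' then
      if inTag = false ∨ st' = 0 then
        pvLoopB cs fuel (i + 1) (i + 1) (decide (cs[i + 1]? = some '<')) 0
          (acc ++ [(cs.drop pos).take (i + 1 - pos)])
      else pvLoopB cs fuel (i + 1) pos inTag st' acc
    else pvLoopB cs fuel (i + 1) pos inTag st' acc
  else if pos < cs.length then acc ++ [cs.drop pos] else acc

-- in_tag = n > 0 and html[0] == "<"  ≡  cs[0]? = some '<'
def splitHtml_alt (html : String) : List String :=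
  (pvLoopB html.toList html.toList.length 0 0 (decide (html.toList[0]? = some '<')) 0 []).map String.ofList

-- ===== PRECONDITION & SPEC =====
def Spec_splitHtml (html : String) (out : List String) : Prop := out = splitHtml_alt html
instance (html : String) (out : List String) : Decidable (Spec_splitHtml html out) := by unfold Spec_splitHtml; infer_instance

-- ===== CLAIM (what is proved, stated in full; the proofs are below) =====
def Claim_equal_splitHtml : Prop := ∀ (html : String), Dom_splitHtml html → Spec_splitHtml html (splitHtml html)

-- ===== LEMMAS AND PROOFS =====

-- the two step functions compute the same transition
theorem pvStep_eq (cs : List Char) (st j : Nat) : pvStepA cs st j = pvStepB cs st j := rfl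

-- A's inner-loop status over range(pos+1, k) (chars pos+1 .. k-1)
def pvStatus (cs : List Char) (pos k : Nat) : Nat :=
  (List.range' (pos + 1) (k - (pos + 1))).foldl (pvStepA cs) 0

theorem pvStatus_base (cs : List Char) (pos k : Nat) (h : k ≤ pos + 1) :
    pvStatus cs pos k = 0 := by
  unfold pvStatus
  rw [Nat.sub_eq_zero_of_le h]
  rfl

theorem pvStatus_succ (cs : List Char) (pos i : Nat) (h : pos < i) :
    pvStatus cs pos (i + 1) = pvStepA cs (pvStatus cs pos i) i := by
  unfold pvStatus
  have h1 : i + 1 - (pos + 1) = (i - (pos + 1)) + 1 := by omega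
  have h2 : pos + 1 + 1 * (i - (pos + 1)) = i := by omega
  rw [h1, List.range'_concat, List.foldl_append, h2]
  rfl

theorem pvLoop_eq (cs : List Char) :
    ∀ n i pos st acc, cs.length - i = n → pos ≤ i → i ≤ cs.length →
    (cs[pos]? = some '<' → st = pvStatus cs pos i) →
    pvLoopA cs (n + 1) i pos acc = pvLoopB cs n i pos (decide (cs[pos]? = some '<')) st acc := by
  intro n
  induction n with
  | zero =>
    intro i pos st acc hn hpi hil hst
    have hi : i = cs.length := by omega
    subst hi
    have hc : cs[cs.length]? = none := by simp
    have hsl : PySem.List.slice cs (some (pos : Int)) (some ((cs.length : Nat) : Int))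
        = cs.drop pos := by
      rw [PySem.List.slice_natCast]
      exact List.take_of_length_le (by simp)
    rw [pvLoopA, pvLoopB]
    by_cases hp : pos < cs.length
    · simp [pvLoopA, hsl, hp, Nat.sub_pos_of_lt hp]
    · have hpe : pos = cs.length := by omega
      subst hpe
      simp [pvLoopA, PySem.List.slice_natCast]
  | succ n ih =>
    intro i pos st acc hn hpi hil hst
    have hi : i < cs.length := by omega
    have hc : cs[i]? = some cs[i] := List.getElem?_eq_getElem hi
    -- the status A computes at candidate i equals B's incrementally updated st'
    have hst' : cs[pos]? = some '<' →
        (if (decide (cs[pos]? = some '<')) = true ∧ pos < i then pvStepB cs st i else st)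
          = pvStatus cs pos (i + 1) := by
      intro htag
      by_cases hpl : pos < i
      · rw [if_pos (by simp [htag, hpl]), hst htag, ← pvStep_eq, ← pvStatus_succ cs pos i hpl]
      · have hpe : pos = i := by omega
        rw [if_neg (by simp [hpl]), hst htag, hpe,
          pvStatus_base cs i i (by omega), pvStatus_base cs i (i + 1) (by omega)]
    -- A's inner fold is pvStatus cs pos (i+1)
    have hfold : (List.range' (pos + 1) (i - pos)).foldl (pvStepA cs) 0
        = pvStatus cs pos (i + 1) := by
      unfold pvStatus
      congr 2
      omega
    have hslice : PySem.List.slice cs (some (pos : Int)) (some ((i : Nat) : Int))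
        = (cs.drop pos).take (i - pos) := PySem.List.slice_natCast cs pos i
    have hslice2 : PySem.List.slice cs (some (pos : Int)) (some ((i + 1 : Nat) : Int))
        = (cs.drop pos).take (i + 1 - pos) := PySem.List.slice_natCast cs pos (i + 1)
    have hcut : (pos < i ∧ pos < cs.length) ↔ pos < i := by omega
    have hslice2' := hslice2
    push_cast at hslice2' 
    rw [pvLoopA, pvLoopB, if_neg (by omega : ¬ i > cs.length), if_pos hi]
    by_cases hlt : cs[i] = '<'
    · -- separator '<'
      by_cases htag : cs[pos]? = some '<'
      · rw [hst' htag]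
        by_cases hz : pvStatus cs pos (i + 1) = 0
        · have this := ih (i + 1) i 0
            (if pos < i then acc ++ [(cs.drop pos).take (i - pos)] else acc)
            (by omega) (by omega) (by omega)
            (fun _ => (pvStatus_base cs i (i + 1) (by omega)).symm)
          simp [hc, hlt] at this
          simp [hc, hlt, htag, hz, hfold, hslice, hcut]
          exact this
        · have this := ih (i + 1) pos (pvStatus cs pos (i + 1)) acc
            (by omega) (by omega) (by omega) (fun _ => rfl)
          simp [htag] at this
          simp [hc, hlt, htag, hz, hfold]
          exact this
      · have this := ih (i + 1) i 0
          (if pos < i then acc ++ [(cs.drop pos).take (i - pos)] else acc)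
          (by omega) (by omega) (by omega)
          (fun _ => (pvStatus_base cs i (i + 1) (by omega)).symm)
        simp [hc, hlt] at this
        simp [hc, hlt, htag, hslice, hcut]
        exact this
    · by_cases hgt : cs[i] = '>'
      · -- separator '>'
        by_cases htag : cs[pos]? = some '<'
        · rw [hst' htag]
          by_cases hz : pvStatus cs pos (i + 1) = 0
          · have this := ih (i + 1) (i + 1) 0 (acc ++ [(cs.drop pos).take (i + 1 - pos)])
              (by omega) (by omega) (by omega)
              (fun _ => (pvStatus_base cs (i + 1) (i + 1) (by omega)).symm)
            simp [hc, hgt, htag, hz, hfold, hslice2', List.length_take, List.length_drop,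
              show 0 < i + 1 - pos by omega, show 0 < cs.length - pos by omega]
            exact this
          · have this := ih (i + 1) pos (pvStatus cs pos (i + 1)) acc
              (by omega) (by omega) (by omega) (fun _ => rfl)
            simp [htag] at this
            simp [hc, hgt, htag, hz, hfold]
            exact this
        · have this := ih (i + 1) (i + 1) 0 (acc ++ [(cs.drop pos).take (i + 1 - pos)])
            (by omega) (by omega) (by omega)
            (fun _ => (pvStatus_base cs (i + 1) (i + 1) (by omega)).symm)
          simp [hc, hgt, htag, hslice2', List.length_take, List.length_drop,
            show 0 < i + 1 - pos by omega, show 0 < cs.length - pos by omega]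
          exact this
      · -- ordinary character
        have this := ih (i + 1) pos
          (if (decide (cs[pos]? = some '<')) = true ∧ pos < i then pvStepB cs st i else st)
          acc (by omega) (by omega) (by omega)
          (fun htag => hst' htag)
        simp [hc, hlt, hgt]
        by_cases htag : cs[pos]? = some '<'
        · simp [htag] at this ⊢
          exact this
        · simp [htag] at this ⊢
          exact this

-- ===== VERDICT (by name: the statement is the Claim_ definition above) =====
theorem splitHtml_spec : Claim_equal_splitHtml := by
  unfold Claim_equal_splitHtml Spec_splitHtml
  intro html _
  unfold splitHtml splitHtml_alt
  congr 1
  exact pvLoop_eq html.toList html.toList.length 0 0 0 [] (by omega) (le_refl 0)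
    (Nat.zero_le _) (fun _ => (pvStatus_base _ _ _ (by omega)).symm)
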